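-- pv_equiv track=rewrite | github.com/samridh10exe/WordlePrediction | src/analysis/historical_patterns.py | _count_consonant_clusters
-- ===== SOURCE A (Python) =====
-- def _count_consonant_clusters(word: str) -> int:
--     """Count consonant clusters in a word."""
--     vowels = set('AEIOU')
--     clusters = 0
--     in_cluster = False
--
--     for char in word:
--         if char not in vowels:
--             if not in_cluster:
--                 clusters += 1
--                 in_cluster = True
--         else:
--             in_cluster = False
--
--     return clusters
-- ===== SOURCE B (Python) =====
-- def _count_consonant_clusters(word: str) -> int:
--     """Count consonant clusters by counting cluster starts: a non-vowel whose
--     predecessor (a sentinel vowel for position 0) is a vowel."""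
--     vowels = 'AEIOU'
--     return sum(1 for prev, ch in zip('A' + word, word)
--                if ch not in vowels and prev in vowels)
-- ===== Notes on version B (the rewrite author's own statement) =====
-- stated objective: alternative
-- what changed: B counts cluster starts by pairing each character with its predecessor (sentinel vowel at the front) instead of A's stateful single pass toggling an in_cluster flag.
import Mathlib
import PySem

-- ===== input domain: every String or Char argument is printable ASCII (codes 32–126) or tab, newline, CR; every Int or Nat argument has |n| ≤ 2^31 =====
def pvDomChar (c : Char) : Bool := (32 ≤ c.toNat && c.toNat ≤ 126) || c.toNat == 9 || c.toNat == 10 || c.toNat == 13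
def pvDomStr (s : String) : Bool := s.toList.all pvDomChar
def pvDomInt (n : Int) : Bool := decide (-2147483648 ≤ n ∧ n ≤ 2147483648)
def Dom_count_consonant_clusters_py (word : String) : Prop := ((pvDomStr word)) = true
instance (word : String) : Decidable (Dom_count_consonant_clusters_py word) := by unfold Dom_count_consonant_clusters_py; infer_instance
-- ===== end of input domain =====

-- B counts cluster starts via predecessor pairs instead of A's in_cluster flag loop; alternative decomposition, same cost.

-- ===== PORT A =====
-- vowels = set('AEIOU')
def pvVowels : List Char := ['A', 'E', 'I', 'O', 'U']

-- the body of A's for-loop: state (clusters, in_cluster)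
def pvStepA (st : Int × Bool) (ch : Char) : Int × Bool :=
  if !(pvVowels.contains ch) then
    if !st.2 then (st.1 + 1, true) else st
  else
    (st.1, false)

def count_consonant_clusters_py (word : String) : Int :=
  (word.toList.foldl pvStepA (0, false)).1

-- ===== PORT B =====
-- one pair (prev, ch) per character, prev = 'A' sentinel at the front (zip('A'+word, word))
def count_consonant_clusters_py_alt (word : String) : Int :=
  (((('A' :: word.toList).zip word.toList).filter
      (fun p => !(pvVowels.contains p.2) && pvVowels.contains p.1)).length : Int)

-- ===== PRECONDITION & SPEC =====
def Spec_count_consonant_clusters_py (word : String) (out : Int) : Prop := out = count_consonant_clusters_py_alt word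
instance (word : String) (out : Int) : Decidable (Spec_count_consonant_clusters_py word out) := by unfold Spec_count_consonant_clusters_py; infer_instance

-- ===== CLAIM (what is proved, stated in full; the proofs are below) =====
def Claim_equal_count_consonant_clusters_py : Prop := ∀ (word : String), Dom_count_consonant_clusters_py word → Spec_count_consonant_clusters_py word (count_consonant_clusters_py word)

-- ===== LEMMAS AND PROOFS =====

-- loop invariant: A's flag equals "previous char was not a vowel"; both sides counted from the same prefix
theorem pv_loop_eq (l : List Char) : ∀ (c : Int) (prev : Char),
    (l.foldl pvStepA (c, !(pvVowels.contains prev))).1 =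
      c + (((prev :: l).zip l).filter
        (fun p => !(pvVowels.contains p.2) && pvVowels.contains p.1)).length := by
  induction l with
  | nil => intro c prev; simp
  | cons ch rest ih =>
    intro c prev
    rw [List.foldl_cons]
    by_cases hch : ch ∈ pvVowels
    · have hs : pvStepA (c, !(pvVowels.contains prev)) ch = (c, !(pvVowels.contains ch)) := by
        simp [pvStepA, hch]
      rw [hs, ih c ch]
      simp [List.zip, hch]
    · by_cases hprev : prev ∈ pvVowels
      · have hs : pvStepA (c, !(pvVowels.contains prev)) ch = (c + 1, !(pvVowels.contains ch)) := by
          simp [pvStepA, hch, hprev]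
        rw [hs, ih (c + 1) ch]
        simp [List.zip, hch, hprev]
        omega
      · have hs : pvStepA (c, !(pvVowels.contains prev)) ch = (c, !(pvVowels.contains ch)) := by
          simp [pvStepA, hch, hprev]
        rw [hs, ih c ch]
        simp [List.zip, hch, hprev]

-- ===== VERDICT (by name: the statement is the Claim_ definition above) =====
theorem count_consonant_clusters_py_spec : Claim_equal_count_consonant_clusters_py := by
  intro word _
  unfold Spec_count_consonant_clusters_py count_consonant_clusters_py count_consonant_clusters_py_alt
  have h := pv_loop_eq word.toList 0 'A'
  simpa using h
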